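-- pv_equiv track=rewrite | github.com/Sugansdv/python | Project_2807/password_checker/core/feedback.py | missing_criteria_generator
-- ===== SOURCE A (Python) =====
-- import string
--
-- def missing_criteria_generator(password):
--     if len(password) < 8:
--         yield "Use at least 8 characters"
--     if not any(c.islower() for c in password):
--         yield "Add a lowercase letter"
--     if not any(c.isupper() for c in password):
--         yield "Add an uppercase letter"
--     if not any(c.isdigit() for c in password):
--         yield "Add a digit"
--     if not any(c in string.punctuation for c in password):
--         yield "Add a special character (e.g., !@#$%)"
-- ===== SOURCE B (Python) =====
-- import string
--
-- def missing_criteria_generator(password):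
--     has_lower = has_upper = has_digit = has_special = False
--     for c in password:
--         if c.islower():
--             has_lower = True
--         if c.isupper():
--             has_upper = True
--         if c.isdigit():
--             has_digit = True
--         if c in string.punctuation:
--             has_special = True
--     if len(password) < 8:
--         yield "Use at least 8 characters"
--     if not has_lower:
--         yield "Add a lowercase letter"
--     if not has_upper:
--         yield "Add an uppercase letter"
--     if not has_digit:
--         yield "Add a digit"
--     if not has_special:
--         yield "Add a special character (e.g., !@#$%)"
-- ===== Notes on version B (the rewrite author's own statement) =====
-- stated objective: alternative
-- what changed: Replaces A's four separate any() scans over the password with a single pass that accumulates four boolean flags, then emits the messages from the flags.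
import Mathlib
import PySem

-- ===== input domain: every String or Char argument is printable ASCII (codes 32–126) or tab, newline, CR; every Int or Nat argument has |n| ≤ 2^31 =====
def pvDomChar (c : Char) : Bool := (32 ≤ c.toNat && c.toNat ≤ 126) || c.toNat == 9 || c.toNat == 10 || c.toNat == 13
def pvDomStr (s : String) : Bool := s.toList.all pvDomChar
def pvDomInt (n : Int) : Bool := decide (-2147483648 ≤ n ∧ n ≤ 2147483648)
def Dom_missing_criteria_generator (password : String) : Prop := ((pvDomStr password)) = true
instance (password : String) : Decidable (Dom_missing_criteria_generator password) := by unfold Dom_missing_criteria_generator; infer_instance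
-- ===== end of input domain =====

-- B replaces A's four separate any() scans with one pass accumulating four boolean flags (alternative decomposition, same messages and order).


-- ===== PORT A =====
-- string.punctuation (a module-level constant of Python's string module)
def pvPunctuation : List Char := "!\"#$%&'()*+,-./:;<=>?@[\\]^_`{|}~".toList

def missing_criteria_generator (password : String) : List String :=
  let cs := password.toList
  (if PySem.Str.len password < 8 then ["Use at least 8 characters"] else []) ++
  (if !(cs.any PySem.Chars.islower) then ["Add a lowercase letter"] else []) ++
  (if !(cs.any PySem.Chars.isupper) then ["Add an uppercase letter"] else []) ++
  (if !(cs.any PySem.Chars.isdigit) then ["Add a digit"] else []) ++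
  (if !(cs.any (fun c => pvPunctuation.contains c)) then ["Add a special character (e.g., !@#$%)"] else [])

-- ===== PORT B =====
-- one pass over the password updating the four flags, then emit from the flags
def pvFlagsStep (s : Bool × Bool × Bool × Bool) (c : Char) : Bool × Bool × Bool × Bool :=
  ((if PySem.Chars.islower c then true else s.1),
   (if PySem.Chars.isupper c then true else s.2.1),
   (if PySem.Chars.isdigit c then true else s.2.2.1),
   (if pvPunctuation.contains c then true else s.2.2.2))

def missing_criteria_generator_alt (password : String) : List String :=
  let f := password.toList.foldl pvFlagsStep (false, false, false, false)
  (if PySem.Str.len password < 8 then ["Use at least 8 characters"] else []) ++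
  (if !f.1 then ["Add a lowercase letter"] else []) ++
  (if !f.2.1 then ["Add an uppercase letter"] else []) ++
  (if !f.2.2.1 then ["Add a digit"] else []) ++
  (if !f.2.2.2 then ["Add a special character (e.g., !@#$%)"] else [])

-- ===== PRECONDITION & SPEC =====
def Spec_missing_criteria_generator (password : String) (out : List String) : Prop := out = missing_criteria_generator_alt password
instance (password : String) (out : List String) : Decidable (Spec_missing_criteria_generator password out) := by unfold Spec_missing_criteria_generator; infer_instance

-- ===== CLAIM (what is proved, stated in full; the proofs are below) =====
def Claim_equal_missing_criteria_generator : Prop := ∀ (password : String), Dom_missing_criteria_generator password → Spec_missing_criteria_generator password (missing_criteria_generator password)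

-- ===== LEMMAS AND PROOFS =====
theorem pvFlags_foldl (l : List Char) (a b c d : Bool) :
    l.foldl pvFlagsStep (a, b, c, d) =
      (a || l.any PySem.Chars.islower,
       b || l.any PySem.Chars.isupper,
       c || l.any PySem.Chars.isdigit,
       d || l.any (fun x => pvPunctuation.contains x)) := by
  induction l generalizing a b c d with
  | nil => simp
  | cons x xs ih =>
    simp only [List.foldl_cons, pvFlagsStep, List.any_cons, ih]
    cases PySem.Chars.islower x <;> cases PySem.Chars.isupper x <;>
      cases PySem.Chars.isdigit x <;> cases pvPunctuation.contains x <;> simp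

-- ===== VERDICT (by name: the statement is the Claim_ definition above) =====
theorem missing_criteria_generator_spec : Claim_equal_missing_criteria_generator := by
  intro password _
  unfold Spec_missing_criteria_generator missing_criteria_generator missing_criteria_generator_alt
  simp [pvFlags_foldl]
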